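-- pv_equiv track=rewrite | github.com/K-ple/Algorithms_Judge | 프로그래머스/lv0/120882. 등수 매기기/등수 매기기.py | solution
-- ===== SOURCE A (Python) =====
-- def solution(score):
--     answer = []
--     a = []
--     rank = []
--     dic = {}
--     for i in score:
--         a.append(sum(i))
--         rank.append(sum(i))
--     rank.sort(reverse = True)
--
--     for j in range(len(a)):
--
--         if rank[j] not in dic:
--             dic[rank[j]] = j+1
--     return [dic[i] for i in a]
-- ===== SOURCE B (Python) =====
-- def solution(score):
--     sums = [sum(i) for i in score]
--     return [1 + sum(1 for t in sums if t > s) for s in sums]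
-- ===== Notes on version B (the rewrite author's own statement) =====
-- stated objective: simpler
-- what changed: Replaces sort + first-occurrence dict table with a direct rank formula: each rank is 1 plus the count of strictly greater sums, computed by scanning the sums list.
import Mathlib
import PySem

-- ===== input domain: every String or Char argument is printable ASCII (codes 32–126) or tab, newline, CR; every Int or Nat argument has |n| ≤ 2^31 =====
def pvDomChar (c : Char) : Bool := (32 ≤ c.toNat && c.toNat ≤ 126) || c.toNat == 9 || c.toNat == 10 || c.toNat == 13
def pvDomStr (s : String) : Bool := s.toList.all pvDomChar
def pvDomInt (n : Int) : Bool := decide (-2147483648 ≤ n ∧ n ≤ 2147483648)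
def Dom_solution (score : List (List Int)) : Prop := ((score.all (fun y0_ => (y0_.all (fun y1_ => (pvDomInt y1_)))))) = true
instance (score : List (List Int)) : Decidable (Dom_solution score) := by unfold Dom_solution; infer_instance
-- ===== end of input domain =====

-- B replaces sort + first-occurrence dict with a direct count of strictly greater sums (simpler decomposition; same return values).

-- ===== PORT A =====
def solution (score : List (List Int)) : List Int :=
  -- a = []; rank = []; for i in score: a.append(sum(i)); rank.append(sum(i))
  let st := score.foldl (fun (p : List Int × List Int) i => (p.1 ++ [i.sum], p.2 ++ [i.sum])) ([], [])
  let a := st.1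
  -- rank.sort(reverse=True)
  let rank := PySem.List.sorted st.2 (fun x => x) true
  -- for j in range(len(a)): if rank[j] not in dic: dic[rank[j]] = j+1
  let dic := (PySem.List.pyRange 0 a.length 1).foldl
      (fun d j => if d.contains (PySem.List.pyGetD rank j 0) then d
                  else d.insert (PySem.List.pyGetD rank j 0) (j + 1)) PySem.Dict.empty
  -- [dic[i] for i in a]   — every i in a occurs in rank, so the key is always present and getD's default is never used
  a.map (fun i => dic.getD i 0)

-- ===== PORT B =====
def solution_alt (score : List (List Int)) : List Int :=
  let sums := score.map (fun i => i.sum)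
  sums.map (fun s => 1 + (sums.map (fun t => if s < t then (1 : Int) else 0)).sum)

-- ===== PRECONDITION & SPEC =====
def Spec_solution (score : List (List Int)) (out : List Int) : Prop := out = solution_alt score
instance (score : List (List Int)) (out : List Int) : Decidable (Spec_solution score out) := by unfold Spec_solution; infer_instance

-- ===== CLAIM (what is proved, stated in full; the proofs are below) =====
def Claim_equal_solution : Prop := ∀ (score : List (List Int)), Dom_solution score → Spec_solution score (solution score)

-- ===== LEMMAS AND PROOFS =====

-- A's first loop builds the same list of sums twice.
theorem pairfold (score : List (List Int)) (p : List Int × List Int) :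
    score.foldl (fun (p : List Int × List Int) i => (p.1 ++ [i.sum], p.2 ++ [i.sum])) p
      = (p.1 ++ score.map (·.sum), p.2 ++ score.map (·.sum)) := by
  induction score generalizing p with
  | nil => simp
  | cons h t ih => simp [List.foldl_cons, ih]

-- A's second loop, as a function of the sorted list it indexes.
def dicFold (r : List Int) : PySem.Dict Int Int :=
  (PySem.List.pyRange 0 r.length 1).foldl
    (fun d j => if d.contains (PySem.List.pyGetD r j 0) then d
                else d.insert (PySem.List.pyGetD r j 0) (j + 1)) PySem.Dict.empty

theorem dicFold_spec (r : List Int) :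
    (∀ x, (dicFold r).contains x = decide (x ∈ r)) ∧
    (∀ s, (dicFold r).getD s 0
      = match PySem.List.index? r s with
        | some k => ((k : Int) + 1)
        | none => 0) := by
  induction r using List.reverseRecOn with
  | nil => constructor <;> intro x <;> simp [dicFold]
  | append_singleton r x ih =>
    have hnn : (0 : Int) ≤ (r.length : Int) := Int.natCast_nonneg _
    have hfold : dicFold (r ++ [x])
        = (fun d (j : Int) => if d.contains (PySem.List.pyGetD (r ++ [x]) j 0) then d
              else d.insert (PySem.List.pyGetD (r ++ [x]) j 0) (j + 1))
            (dicFold r) (r.length : Int) := by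
      unfold dicFold
      have hlen : ((r ++ [x]).length : Int) = (r.length : Int) + 1 := by simp
      rw [hlen, PySem.List.pyRange_one_succ_right hnn, List.foldl_append]
      simp only [List.foldl_cons, List.foldl_nil]
      have hinner :
          List.foldl
            (fun (d : PySem.Dict Int Int) (j : Int) =>
              if d.contains (PySem.List.pyGetD (r ++ [x]) j 0) then d
              else d.insert (PySem.List.pyGetD (r ++ [x]) j 0) (j + 1))
            PySem.Dict.empty (PySem.List.pyRange 0 (r.length : Int))
          = List.foldl
            (fun (d : PySem.Dict Int Int) (j : Int) =>
              if d.contains (PySem.List.pyGetD r j 0) then d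
              else d.insert (PySem.List.pyGetD r j 0) (j + 1))
            PySem.Dict.empty (PySem.List.pyRange 0 (r.length : Int)) := by
        refine PySem.List.foldl_congr_mem _ _ _ _ ?_
        intro d j hj
        have hj' := (PySem.List.mem_pyRange_one).1 hj
        have h1 : j.toNat < r.length := by omega
        rw [PySem.List.pyGetD_eq_getElem (r ++ [x]) 0 (by omega) (by simp; omega),
            PySem.List.pyGetD_eq_getElem r 0 (by omega) (by omega),
            List.getElem_append_left h1]
      rw [hinner]
    have hx : PySem.List.pyGetD (r ++ [x]) (r.length : Int) 0 = x := by
      rw [PySem.List.pyGetD_eq_getElem (r ++ [x]) 0 hnn (by simp)]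
      simp
    by_cases hmem : x ∈ r
    · have heq : dicFold (r ++ [x]) = dicFold r := by
        rw [hfold]; simp [hx, ih.1 x, hmem]
      refine ⟨fun y => ?_, fun s => ?_⟩
      · rw [heq, ih.1 y]
        by_cases hy : y ∈ r
        · simp [hy]
        · have hyx : y ≠ x := fun e => hy (e ▸ hmem)
          simp [hy, hyx]
      · rw [heq, ih.2 s]
        by_cases hs : s ∈ r
        · rw [PySem.List.index?_append_of_mem [x] hs]
        · have h1 : PySem.List.index? r s = none := (PySem.List.index?_eq_none_iff _ _).2 hs
          by_cases hsx : s = x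
          · exact absurd (hsx ▸ hmem) hs
          · have h2 : PySem.List.index? (r ++ [x]) s = none := by
              apply (PySem.List.index?_eq_none_iff _ _).2
              simp [hs, hsx]
            rw [h1, h2]
    · have heq : dicFold (r ++ [x]) = (dicFold r).insert x ((r.length : Int) + 1) := by
        rw [hfold]; simp [hx, ih.1 x, hmem]
      refine ⟨fun y => ?_, fun s => ?_⟩
      · rw [heq, PySem.Dict.contains_insert, ih.1 y]
        by_cases hyx : y = x <;> simp [hyx]
      · rw [heq]
        by_cases hsx : s = x
        · subst hsx
          rw [PySem.Dict.getD_insert_self, PySem.List.index?_append_singleton_self r s hmem]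
        · rw [PySem.Dict.getD_insert_of_ne _ _ _ hsx, ih.2 s]
          by_cases hs : s ∈ r
          · rw [PySem.List.index?_append_of_mem [x] hs]
          · have h1 : PySem.List.index? r s = none := (PySem.List.index?_eq_none_iff _ _).2 hs
            have h2 : PySem.List.index? (r ++ [x]) s = none := by
              apply (PySem.List.index?_eq_none_iff _ _).2
              simp [hs, hsx]
            rw [h1, h2]

-- In a descending-sorted list, the first index of s is the number of elements strictly greater than s.
theorem index_desc (r : List Int) (hp : r.Pairwise (fun a b => b ≤ a)) (s : Int) (hs : s ∈ r) :
    PySem.List.index? r s = some (r.countP (fun t => decide (s < t))) := by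
  induction r with
  | nil => cases hs
  | cons h t ih =>
    rcases List.pairwise_cons.1 hp with ⟨hh, hpt⟩
    by_cases hsh : h = s
    · subst hsh
      rw [PySem.List.index?_cons_self]
      have : t.countP (fun t => decide (h < t)) = 0 := by
        apply List.countP_eq_zero.2
        intro y hy
        simpa using not_lt.2 (hh y hy)
      simp [this]
    · have hst : s ∈ t := by cases hs with
        | head => exact absurd rfl hsh
        | tail _ h => exact h
      have hlt : s < h := lt_of_le_of_ne (hh s hst) (fun e => hsh e.symm)
      rw [PySem.List.index?_cons_of_ne t hsh, ih hpt hst]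
      simp [hlt]

theorem solution_eq (score : List (List Int)) : solution score = solution_alt score := by
  unfold solution solution_alt
  rw [pairfold]
  simp only [List.nil_append]
  set sums := score.map (·.sum) with hsums
  set r := PySem.List.sorted sums (fun x => x) true with hr
  have hlen : r.length = sums.length := by
    exact (PySem.List.sorted_perm sums (fun x => x) true).length_eq
  have hdic : ∀ s ∈ sums,
      (dicFold r).getD s 0 = ((sums.countP (fun t => decide (s < t)) : Int) + 1) := by
    intro s hsmem
    have hsr : s ∈ r := (PySem.List.mem_sorted _ _ _ _).2 hsmem
    have hidx := index_desc r (PySem.List.sorted_pairwise_rev sums (fun x => x)) s hsr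
    have hcnt : r.countP (fun t => decide (s < t)) = sums.countP (fun t => decide (s < t)) :=
      (PySem.List.sorted_perm sums (fun x => x) true).countP_eq _
    rw [(dicFold_spec r).2 s, hidx, hcnt]
  have hgoal : ∀ s ∈ sums,
      ((dicFold r).getD s 0) = 1 + (sums.map (fun t => if s < t then (1 : Int) else 0)).sum := by
    intro s hsmem
    rw [hdic s hsmem,
        show (fun t => if s < t then (1 : Int) else 0)
           = (fun t => if (fun t => decide (s < t)) t = true then (1 : Int) else 0) from by
          funext t; simp,
        PySem.List.sum_map_ite_one_zero]
    omega
  calc sums.map (fun i =>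
        (((PySem.List.pyRange 0 (sums.length : Int) 1).foldl
          (fun d j => if d.contains (PySem.List.pyGetD r j 0) then d
                      else d.insert (PySem.List.pyGetD r j 0) (j + 1)) PySem.Dict.empty)).getD i 0)
      = sums.map (fun i => (dicFold r).getD i 0) := by
        unfold dicFold; rw [hlen]
    _ = sums.map (fun s => 1 + (sums.map (fun t => if s < t then (1 : Int) else 0)).sum) :=
        List.map_congr_left hgoal

-- ===== VERDICT (by name: the statement is the Claim_ definition above) =====
theorem solution_spec : Claim_equal_solution := by
  intro score _
  unfold Spec_solution
  exact solution_eq score
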